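-- pv_equiv track=rewrite | github.com/eliseydudin/ict-solutions | codeforces/yarik_and_array.py | solve
-- ===== SOURCE A (Python) =====
-- def solve(arr: list[int], N: int):
--     cur_sum = arr[0]
--     maximum_sum = arr[0]
--
--     for i in range(1, N):
--         if arr[i] % 2 != arr[i - 1] % 2:
--             if cur_sum + arr[i] > arr[i]:
--                 cur_sum += arr[i]
--             else:
--                 cur_sum = arr[i]
--         else:
--             cur_sum = arr[i]
--
--         maximum_sum = max(maximum_sum, cur_sum)
--
--     return maximum_sum
-- ===== SOURCE B (Python) =====
-- def solve(arr, N):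
--     m = N if N > 1 else 1
--     # phase 1: split the prefix arr[:m] into maximal runs of alternating parity
--     runs = []
--     start = 0
--     for i in range(1, m):
--         if arr[i] % 2 == arr[i - 1] % 2:
--             runs.append(arr[start:i])
--             start = i
--     runs.append(arr[start:m])
--     # phase 2: Kadane inside each run, best threaded across runs
--     best = arr[0]
--     for run in runs:
--         cur = 0
--         for x in run:
--             cur = cur + x if cur > 0 else x
--             if cur > best:
--                 best = cur
--     return best
-- ===== Notes on version B (the rewrite author's own statement) =====
-- stated objective: alternative
-- what changed: B is two-phase: it first partitions the prefix arr[:max(N,1)] into maximal alternating-parity runs (collecting them as slices), then runs a plain Kadane scan inside each run with the best threaded across runs, instead of A's single fused index loop with a parity-conditional reset.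
import Mathlib
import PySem

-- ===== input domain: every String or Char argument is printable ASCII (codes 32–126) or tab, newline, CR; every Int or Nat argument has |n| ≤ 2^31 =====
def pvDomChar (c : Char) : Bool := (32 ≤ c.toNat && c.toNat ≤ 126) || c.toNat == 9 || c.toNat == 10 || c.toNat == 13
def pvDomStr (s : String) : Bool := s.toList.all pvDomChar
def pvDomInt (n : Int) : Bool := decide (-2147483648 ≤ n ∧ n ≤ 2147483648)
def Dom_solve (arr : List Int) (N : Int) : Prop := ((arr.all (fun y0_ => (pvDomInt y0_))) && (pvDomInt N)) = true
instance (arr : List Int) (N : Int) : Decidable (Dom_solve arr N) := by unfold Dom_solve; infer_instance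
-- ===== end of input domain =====

-- B re-implements A's fused parity-Kadane loop as a two-phase pass (runs partition, then
-- per-run Kadane); objective: alternative decomposition, same value on all of Pre_.

-- ===== PORT A =====
-- loop body of A's for-loop (state = (cur_sum, maximum_sum))
def stepA (arr : List Int) (st : Int × Int) (i : Int) : Int × Int :=
  let ai := PySem.List.pyGetD arr i 0
  let ap := PySem.List.pyGetD arr (i - 1) 0
  let cur :=
    if PySem.Int.mod ai 2 ≠ PySem.Int.mod ap 2 then
      (if st.1 + ai > ai then st.1 + ai else ai)
    else ai
  (cur, max st.2 cur)

def solve (arr : List Int) (N : Int) : Int :=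
  let a0 := PySem.List.pyGetD arr 0 0
  ((PySem.List.pyRange 1 N 1).foldl (stepA arr) (a0, a0)).2

-- ===== PORT B =====
-- phase-1 loop body: close the current run when parities agree (state = (runs, start))
def stepB (arr : List Int) (st : List (List Int) × Int) (i : Int) : List (List Int) × Int :=
  let ai := PySem.List.pyGetD arr i 0
  let ap := PySem.List.pyGetD arr (i - 1) 0
  if PySem.Int.mod ai 2 = PySem.Int.mod ap 2 then
    (st.1 ++ [PySem.List.slice arr (some st.2) (some i)], i)
  else st

-- phase-2 inner Kadane step (state = (cur, best))
def kadStep (s : Int × Int) (x : Int) : Int × Int :=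
  let c := if s.1 > 0 then s.1 + x else x
  (c, if c > s.2 then c else s.2)

def runBest (b : Int) (run : List Int) : Int :=
  (run.foldl kadStep (0, b)).2

def solve_alt (arr : List Int) (N : Int) : Int :=
  let m : Int := if N > 1 then N else 1
  let p := (PySem.List.pyRange 1 m 1).foldl (stepB arr) ([], 0)
  let runs := p.1 ++ [PySem.List.slice arr (some p.2) (some m)]
  runs.foldl runBest (PySem.List.pyGetD arr 0 0)

-- ===== PRECONDITION & SPEC =====
-- A raises IndexError on arr = [] (arr[0]) and whenever N > len(arr) (arr[i] in the loop);
-- Pre_ excludes exactly those crashing inputs.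
def Pre_solve (arr : List Int) (N : Int) : Prop := arr ≠ [] ∧ N ≤ (arr.length : Int)
instance (arr : List Int) (N : Int) : Decidable (Pre_solve arr N) := by
  unfold Pre_solve; infer_instance

def pvWitness_solve : List Int × Int := ([1, 2, 2, -3], 4)

def Spec_solve (arr : List Int) (N : Int) (out : Int) : Prop := out = solve_alt arr N
instance (arr : List Int) (N : Int) (out : Int) : Decidable (Spec_solve arr N out) := by
  unfold Spec_solve; infer_instance

-- ===== CLAIM (what is proved, stated in full; the proofs are below) =====
def Claim_equal_solve : Prop :=
  ∀ (arr : List Int) (N : Int), Dom_solve arr N → Pre_solve arr N → Spec_solve arr N (solve arr N)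

-- ===== LEMMAS AND PROOFS =====

-- a one-element slice
lemma slice_single (arr : List Int) (k : Nat) (hk : k < arr.length) :
    PySem.List.slice arr (some (k : Int)) (some ((k : Int) + 1)) = [arr[k]] := by
  have h1 : ((k : Int) + 1) = ((k + 1 : Nat) : Int) := by push_cast; ring
  rw [h1, PySem.List.slice_natCast]
  have h2 : k + 1 - k = 1 := by omega
  rw [h2, List.take_one_drop_eq_of_lt_length hk]
  simp

-- extending a slice by one element on the right
lemma slice_snoc (arr : List Int) (s k : Nat) (hs : s ≤ k) (hk : k < arr.length) :
    PySem.List.slice arr (some (s : Int)) (some ((k : Int) + 1)) =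
      PySem.List.slice arr (some (s : Int)) (some (k : Int)) ++ [arr[k]] := by
  have h1 : ((k : Int) + 1) = ((k + 1 : Nat) : Int) := by push_cast; ring
  rw [h1, PySem.List.slice_natCast, PySem.List.slice_natCast]
  have h2 : k + 1 - s = (k - s) + 1 := by omega
  rw [h2, List.take_add_one]
  congr 1
  have h3 : s + (k - s) = k := by omega
  have h4 : k - s < (arr.drop s).length := by simp; omega
  simp [List.getElem?_eq_getElem h4, List.getElem_drop, h3]

lemma pyGetD_nat (arr : List Int) (k : Nat) (hk : k < arr.length) :
    PySem.List.pyGetD arr (k : Int) 0 = arr[k] := by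
  simp [PySem.List.pyGetD_natCast, List.getD_eq_getElem?_getD, List.getElem?_eq_getElem hk]

-- the joint invariant: after processing indices 1..k-1, B's (runs, start, threaded best)
-- represent exactly A's (cur_sum, maximum_sum)
lemma inv (arr : List Int) (hne : arr ≠ []) :
    ∀ (k : Nat), 1 ≤ k → k ≤ arr.length →
      0 ≤ ((PySem.List.pyRange 1 (k : Int) 1).foldl (stepB arr) ([], 0)).2 ∧
      ((PySem.List.pyRange 1 (k : Int) 1).foldl (stepB arr) ([], 0)).2 < (k : Int) ∧
      (PySem.List.slice arr
          (some ((PySem.List.pyRange 1 (k : Int) 1).foldl (stepB arr) ([], 0)).2)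
          (some (k : Int))).foldl kadStep
        (0, ((PySem.List.pyRange 1 (k : Int) 1).foldl (stepB arr) ([], 0)).1.foldl runBest
              (PySem.List.pyGetD arr 0 0)) =
      (PySem.List.pyRange 1 (k : Int) 1).foldl (stepA arr)
        (PySem.List.pyGetD arr 0 0, PySem.List.pyGetD arr 0 0) := by
  intro k
  induction k with
  | zero => intro h; omega
  | succ j ih =>
    intro _ hlen
    by_cases hj : 1 ≤ j
    · -- inductive step: process index j
      have hjlen : j ≤ arr.length := by omega
      have hjlt : j < arr.length := by omega
      obtain ⟨hs0, hslt, hIH⟩ := ih hj hjlen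
      have hcast : (((j + 1 : Nat)) : Int) = (j : Int) + 1 := by push_cast; ring
      have hsplit : PySem.List.pyRange 1 ((j + 1 : Nat) : Int) 1 =
          PySem.List.pyRange 1 (j : Int) 1 ++ [(j : Int)] := by
        rw [hcast, PySem.List.pyRange_one_succ_right (by exact_mod_cast hj)]
      set P := (PySem.List.pyRange 1 (j : Int) 1).foldl (stepB arr) ([], 0) with hP
      set Q := (PySem.List.pyRange 1 (j : Int) 1).foldl (stepA arr)
          (PySem.List.pyGetD arr 0 0, PySem.List.pyGetD arr 0 0) with hQ
      have hgj : PySem.List.pyGetD arr (j : Int) 0 = arr[j] := pyGetD_nat arr j hjlt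
      have hgp : PySem.List.pyGetD arr ((j : Int) - 1) 0 = arr[j - 1] := by
        have h5 : (j : Int) - 1 = ((j - 1 : Nat) : Int) := by omega
        rw [h5, pyGetD_nat arr (j - 1) (by omega)]
      rw [hsplit]
      simp only [List.foldl_append, List.foldl_cons, List.foldl_nil]
      by_cases hpar : arr[j] % 2 = arr[j - 1] % 2
      · -- parities equal: close the run, reset
        have hB : stepB arr P (j : Int) =
            (P.1 ++ [PySem.List.slice arr (some P.2) (some (j : Int))], (j : Int)) := by
          simp [stepB, hgj, hgp, hpar]
        have hA : stepA arr Q (j : Int) = (arr[j], max Q.2 arr[j]) := by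
          simp [stepA, hgj, hgp, hpar]
        rw [hB, hA]
        refine ⟨by positivity, by omega, ?_⟩
        have hb' : (P.1 ++ [PySem.List.slice arr (some P.2) (some (j : Int))]).foldl runBest
            (PySem.List.pyGetD arr 0 0) = Q.2 := by
          rw [List.foldl_append]
          simp only [List.foldl_cons, List.foldl_nil, runBest]
          exact congrArg Prod.snd hIH
        rw [hcast, slice_single arr j hjlt]
        simp only [hb', List.foldl_cons, List.foldl_nil, kadStep]
        have h0 : ¬ ((0 : Int) > 0) := by omega
        simp only [if_neg h0, Prod.mk.injEq]
        refine ⟨by trivial, ?_⟩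
        rw [max_def]; split_ifs <;> omega
      · -- parities differ: extend the current run
        have hB : stepB arr P (j : Int) = P := by
          simp [stepB, hgj, hgp, hpar]
        have hA : stepA arr Q (j : Int) = kadStep Q arr[j] := by
          simp only [stepA, kadStep]
          rw [hgj, hgp]
          simp only [Prod.mk.injEq]
          refine ⟨?_, ?_⟩ <;> simp [hpar, max_def] <;> split_ifs <;> omega
        rw [hB, hA]
        refine ⟨hs0, by omega, ?_⟩
        have hsnat : P.2 = ((P.2.toNat : Nat) : Int) := by omega
        have hsle : P.2.toNat ≤ j := by omega
        rw [hcast, hsnat, slice_snoc arr P.2.toNat j hsle hjlt, List.foldl_append]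
        simp only [List.foldl_cons, List.foldl_nil]
        rw [← hsnat, hIH]
    · -- base case k = 1
      have hj0 : j = 0 := by omega
      subst hj0
      have h11 : ((0 + 1 : Nat) : Int) = 1 := by norm_num
      rw [h11, PySem.List.pyRange_one_eq_nil (by omega)]
      simp only [List.foldl_nil]
      refine ⟨le_refl 0, by norm_num, ?_⟩
      obtain ⟨x, xs, rfl⟩ := List.exists_cons_of_ne_nil hne
      have hsl : PySem.List.slice (x :: xs) (some (0 : Int)) (some (1 : Int)) = [x] := by
        have h6 := slice_single (x :: xs) 0 (by simp)
        simpa using h6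
      rw [hsl]
      simp only [List.foldl_cons, List.foldl_nil, kadStep, PySem.List.pyGetD_zero_cons]
      have h0 : ¬ ((0 : Int) > 0) := by omega
      simp only [if_neg h0, Prod.mk.injEq]
      refine ⟨by trivial, ?_⟩
      split_ifs <;> omega

-- ===== VERDICT (by name: the statement is the Claim_ definition above) =====
theorem solve_spec : Claim_equal_solve := by
  intro arr N _ hpre
  obtain ⟨hne, hlen⟩ := hpre
  unfold Spec_solve solve solve_alt
  by_cases hN : N > 1
  · -- N ≥ 2: use the invariant at k = N.toNat
    have hlen' : N ≤ (arr.length : Int) := hlen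
    have hk1 : 1 ≤ N.toNat := by omega
    have hk2 : N.toNat ≤ arr.length := by omega
    have hNk : ((N.toNat : Nat) : Int) = N := by omega
    obtain ⟨hs0, hslt, hIH⟩ := inv arr hne N.toNat hk1 hk2
    rw [hNk] at hs0 hslt hIH
    simp only [if_pos hN, List.foldl_append, List.foldl_cons, List.foldl_nil]
    rw [← congrArg Prod.snd hIH]
    rfl
  · -- N ≤ 1: A's loop is empty, B has the single run arr[0:1]
    have hr : PySem.List.pyRange 1 N 1 = [] := PySem.List.pyRange_one_eq_nil (by omega)
    simp only [if_neg hN, hr, List.foldl_nil]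
    have hr1 : PySem.List.pyRange 1 (1 : Int) 1 = [] := PySem.List.pyRange_one_eq_nil (by omega)
    rw [hr1]
    simp only [List.foldl_nil, List.foldl_cons]
    obtain ⟨x, xs, rfl⟩ := List.exists_cons_of_ne_nil hne
    have hsl : PySem.List.slice (x :: xs) (some (0 : Int)) (some (1 : Int)) = [x] := by
      have h6 := slice_single (x :: xs) 0 (by simp)
      simpa using h6
    rw [hsl]
    simp only [List.nil_append, List.foldl_cons, List.foldl_nil, runBest, kadStep,
      PySem.List.pyGetD_zero_cons]
    have h0 : ¬ ((0 : Int) > 0) := by omega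
    simp only [if_neg h0]
    split_ifs <;> omega
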